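-- pv_equiv track=rewrite | github.com/poojarevathi1820-lgtm/chatbot-backend | check.py | parse_brand_model
-- ===== SOURCE A (Python) =====
-- def parse_brand_model(extracted: str) -> dict:
--     brand = ''
--     model = ''
--     for part in extracted.split(','):
--         part = part.strip()
--         if part.lower().startswith('brand:'):
--             brand = part.split(':', 1)[1].strip()
--         elif part.lower().startswith('model:'):
--             model = part.split(':', 1)[1].strip()
--     return {'brand': brand, 'model': model}
-- ===== SOURCE B (Python) =====
-- def parse_brand_model(extracted: str) -> dict:
--     parts = [p.strip() for p in extracted.split(',')]
--
--     def last_value(prefix):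
--         # last assignment wins in A, so scan back-to-front with early exit
--         for p in reversed(parts):
--             if p.lower().startswith(prefix):
--                 return p.split(':', 1)[1].strip()
--         return ''
--
--     return {'brand': last_value('brand:'), 'model': last_value('model:')}
-- ===== Notes on version B (the rewrite author's own statement) =====
-- stated objective: alternative
-- what changed: B replaces A's single forward fold over a (brand, model) accumulator pair with two independent back-to-front searches with early exit (last matching part wins, so the first match in the reversed list is the answer), after one staged pass that strips the parts.
import Mathlib
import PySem

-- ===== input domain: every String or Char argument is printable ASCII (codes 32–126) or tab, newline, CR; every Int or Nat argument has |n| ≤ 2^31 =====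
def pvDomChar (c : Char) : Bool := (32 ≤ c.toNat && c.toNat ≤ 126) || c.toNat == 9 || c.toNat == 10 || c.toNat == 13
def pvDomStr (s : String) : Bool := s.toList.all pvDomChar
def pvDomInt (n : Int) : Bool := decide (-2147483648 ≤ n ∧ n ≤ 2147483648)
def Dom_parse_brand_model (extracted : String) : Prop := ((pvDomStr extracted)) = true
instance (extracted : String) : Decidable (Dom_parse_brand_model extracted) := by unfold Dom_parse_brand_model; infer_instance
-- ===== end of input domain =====

-- B replaces A's forward fold over a (brand, model) accumulator with two independent
-- back-to-front searches (last match wins) over the pre-stripped parts (same cost).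

-- ===== PORT A =====
-- one loop iteration of A: update the (brand, model) accumulator pair
def pvStepA (st : String × String) (part0 : String) : String × String :=
  if PySem.Str.startswith (PySem.Str.lower (PySem.Str.strip part0)) "brand:" then
    -- part.split(':', 1)[1].strip(); index 1 exists because the prefix test guarantees a ':'
    (PySem.Str.strip (((PySem.Str.splitMax? (PySem.Str.strip part0) ":" 1).getD []).getD 1 ""), st.2)
  else if PySem.Str.startswith (PySem.Str.lower (PySem.Str.strip part0)) "model:" then
    (st.1, PySem.Str.strip (((PySem.Str.splitMax? (PySem.Str.strip part0) ":" 1).getD []).getD 1 ""))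
  else st

def parse_brand_model (extracted : String) : List (String × String) :=
  let st := ((PySem.Str.split? extracted ",").getD []).foldl pvStepA ("", "")
  [("brand", st.1), ("model", st.2)]

-- ===== PORT B =====
-- p.split(':', 1)[1].strip() on an already-stripped part p
def pvVal (p : String) : String :=
  PySem.Str.strip (((PySem.Str.splitMax? p ":" 1).getD []).getD 1 "")

-- B's inner 'for p in reversed(parts): … return …' loop: first match in the given list
def pvLastValue (pre : String) : List String → String
  | [] => ""
  | p :: rest =>
      if PySem.Str.startswith (PySem.Str.lower p) pre then pvVal p
      else pvLastValue pre rest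

def parse_brand_model_alt (extracted : String) : List (String × String) :=
  let parts := (((PySem.Str.split? extracted ",").getD []).map PySem.Str.strip).reverse
  [("brand", pvLastValue "brand:" parts), ("model", pvLastValue "model:" parts)]

-- ===== PRECONDITION & SPEC =====
def Spec_parse_brand_model (extracted : String) (out : List (String × String)) : Prop := out = parse_brand_model_alt extracted
instance (extracted : String) (out : List (String × String)) : Decidable (Spec_parse_brand_model extracted out) := by unfold Spec_parse_brand_model; infer_instance

-- ===== CLAIM (what is proved, stated in full; the proofs are below) =====
def Claim_equal_parse_brand_model : Prop := ∀ (extracted : String), Dom_parse_brand_model extracted → Spec_parse_brand_model extracted (parse_brand_model extracted)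

-- ===== LEMMAS AND PROOFS =====

-- a string cannot start with both "brand:" and "model:" (first characters differ)
theorem pv_not_both (s : String) (h : PySem.Str.startswith s "brand:" = true) :
    PySem.Str.startswith s "model:" = false := by
  rw [PySem.Str.startswith_eq] at h ⊢
  rw [PySem.Chars.startswith_iff] at h
  apply Bool.eq_false_iff.mpr
  intro hm
  rw [PySem.Chars.startswith_iff] at hm
  obtain ⟨t1, h1⟩ := h
  obtain ⟨t2, h2⟩ := hm
  have := h1.trans h2.symm
  show False
  simp [show ("brand:").toList = ['b','r','a','n','d',':'] from rfl,
        show ("model:").toList = ['m','o','d','e','l',':'] from rfl] at this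

-- A's fold result is exactly the pair of B's back-to-front first matches
theorem pv_fold (l : List String) :
    l.foldl pvStepA ("", "") =
      (pvLastValue "brand:" ((l.map PySem.Str.strip).reverse),
       pvLastValue "model:" ((l.map PySem.Str.strip).reverse)) := by
  induction l using List.reverseRecOn with
  | nil => rfl
  | append_singleton xs x ih =>
    rw [List.foldl_append, List.foldl_cons, List.foldl_nil, ih]
    simp only [List.map_append, List.map_cons, List.map_nil, List.reverse_append,
      List.reverse_cons, List.reverse_nil, List.nil_append, List.cons_append]
    simp only [pvStepA, pvLastValue, pvVal]
    by_cases hb : PySem.Str.startswith (PySem.Str.lower (PySem.Str.strip x)) "brand:" = true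
    · rw [if_pos hb, if_pos hb, if_neg (by rw [pv_not_both _ hb]; exact Bool.false_ne_true)]
    · rw [if_neg hb, if_neg hb]
      by_cases hm : PySem.Str.startswith (PySem.Str.lower (PySem.Str.strip x)) "model:" = true
      · rw [if_pos hm, if_pos hm]
      · rw [if_neg hm, if_neg hm]

-- ===== VERDICT (by name: the statement is the Claim_ definition above) =====
theorem parse_brand_model_spec : Claim_equal_parse_brand_model := by
  intro extracted _
  unfold Spec_parse_brand_model parse_brand_model parse_brand_model_alt
  rw [pv_fold]
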